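-- pv_equiv track=rewrite | github.com/JernejHabjan/School | FRI/Programing/Python/1Letnik/Other/Poljubne vaje/Priprava na izpit/izpit 23.jan 2013.py | primerjaj
-- ===== SOURCE A (Python) =====
-- def primerjaj(s, t):
--     if len(s) == len(t):
--         a = 0
--         b = 0
--         for x in range(len(s)):
--             if s[x] < t[x]:
--                 a += 1
--             if s[x] > t[x]:
--                 b += 1
--         if len(s) == a:
--             return -1
--         if len(s) == b:
--             return 1
--         else:
--             return 0
--     return 0
-- ===== SOURCE B (Python) =====
-- def _sign(x, y):
--     if x < y:
--         return -1
--     if x > y: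
--         return 1
--     return 0
--
--
-- def primerjaj(s, t):
--     if len(s) != len(t) or not s:
--         return 0
--     v = _sign(s[0], t[0])
--     if v == 0:
--         return 0
--     for x, y in zip(s[1:], t[1:]):
--         if _sign(x, y) != v:
--             return 0
--     return v
-- ===== Notes on version B (the rewrite author's own statement) =====
-- stated objective: alternative
-- what changed: Instead of counting less/greater positions over the whole input and comparing the counts to the length, B takes the comparison sign of the first pair as the candidate verdict and verifies the remaining pairs against it with an early exit to 0 on the first mismatch.
-- intended difference: On the empty pair of sequences A returns -1 (its vacuous all-less count check fires), while B returns 0, the intended value since two empty sequences are equal, not elementwise less. — e.g. on primerjaj([], []): A returns -1, B returns 0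
import Mathlib
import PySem

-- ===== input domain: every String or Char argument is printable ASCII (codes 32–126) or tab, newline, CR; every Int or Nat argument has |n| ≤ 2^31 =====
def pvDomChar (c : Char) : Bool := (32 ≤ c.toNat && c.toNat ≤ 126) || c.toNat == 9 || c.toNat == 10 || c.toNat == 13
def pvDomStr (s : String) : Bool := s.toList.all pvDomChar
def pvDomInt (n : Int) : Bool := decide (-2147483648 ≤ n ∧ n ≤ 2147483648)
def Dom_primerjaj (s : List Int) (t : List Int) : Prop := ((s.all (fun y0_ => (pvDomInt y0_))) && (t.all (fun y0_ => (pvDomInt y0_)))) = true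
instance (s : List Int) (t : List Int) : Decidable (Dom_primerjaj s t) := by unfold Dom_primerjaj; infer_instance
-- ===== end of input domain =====

-- B replaces A's two whole-pass counters (compared against the length) by a
-- first-pair candidate sign verified against the rest with an early exit
-- (objective: alternative); on the empty pair A returns -1 and B the intended 0.

-- ===== PORT A =====
def primerjaj (s : List Int) (t : List Int) : Int :=
  if s.length = t.length then
    let ab : Int × Int :=
      (PySem.List.pyRange 0 (s.length : Int) 1).foldl
        (fun (ab : Int × Int) x =>
          (if PySem.List.pyGetD s x 0 < PySem.List.pyGetD t x 0 then ab.1 + 1 else ab.1,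
           if PySem.List.pyGetD s x 0 > PySem.List.pyGetD t x 0 then ab.2 + 1 else ab.2)) (0, 0)
    if (s.length : Int) = ab.1 then -1
    else if (s.length : Int) = ab.2 then 1
    else 0
  else 0

-- ===== PORT B =====
def pvSign (x y : Int) : Int :=
  if x < y then -1 else if x > y then 1 else 0

-- the for-loop of Source B: check each remaining pair against v, early exit to 0
def pvCheck (v : Int) : List (Int × Int) → Int
  | [] => v
  | p :: rest => if pvSign p.1 p.2 ≠ v then 0 else pvCheck v rest

def primerjaj_alt (s : List Int) (t : List Int) : Int :=
  if s.length ≠ t.length ∨ s = [] then 0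
  else
    let v := pvSign (s.headD 0) (t.headD 0)   -- s[0], t[0]: both nonempty here
    if v = 0 then 0
    else pvCheck v ((s.drop 1).zip (t.drop 1))   -- zip(s[1:], t[1:])

-- ===== PRECONDITION & SPEC =====
-- On the empty pair ([], []) A returns -1 (its vacuous all-less count check
-- fires), while B returns 0, the intended value since two empty sequences are
-- equal, not elementwise less.
def D_primerjaj (s : List Int) (t : List Int) : Prop := s = [] ∧ t = []
instance (s : List Int) (t : List Int) : Decidable (D_primerjaj s t) := by unfold D_primerjaj; infer_instance

def Spec_primerjaj (s : List Int) (t : List Int) (out : Int) : Prop := ¬ D_primerjaj s t → out = primerjaj_alt s t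
instance (s : List Int) (t : List Int) (out : Int) : Decidable (Spec_primerjaj s t out) := by unfold Spec_primerjaj; infer_instance

def pvDiffWitness_primerjaj : List Int × List Int := ([], [])
def pvDiffWitnessOut_primerjaj : Int × Int := (-1, 0)

-- ===== CLAIM (what is proved, stated in full; the proofs are below) =====
def Claim_unchanged_primerjaj : Prop := ∀ (s : List Int) (t : List Int), Dom_primerjaj s t → Spec_primerjaj s t (primerjaj s t)
def Claim_changed_primerjaj : Prop := Dom_primerjaj (pvDiffWitness_primerjaj.1) (pvDiffWitness_primerjaj.2) ∧ D_primerjaj (pvDiffWitness_primerjaj.1) (pvDiffWitness_primerjaj.2) ∧ primerjaj (pvDiffWitness_primerjaj.1) (pvDiffWitness_primerjaj.2) = pvDiffWitnessOut_primerjaj.1 ∧ primerjaj_alt (pvDiffWitness_primerjaj.1) (pvDiffWitness_primerjaj.2) = pvDiffWitnessOut_primerjaj.2 ∧ pvDiffWitnessOut_primerjaj.1 ≠ pvDiffWitnessOut_primerjaj.2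
def Claim_exact_primerjaj : Prop := ∀ (s : List Int) (t : List Int), Dom_primerjaj s t → D_primerjaj s t → primerjaj s t ≠ primerjaj_alt s t

-- ===== LEMMAS AND PROOFS =====
theorem fold_counts :
    ∀ (l : List (Int × Int)) (a b : Int),
      l.foldl (fun (ab : Int × Int) p =>
        (if p.1 < p.2 then ab.1 + 1 else ab.1, if p.1 > p.2 then ab.2 + 1 else ab.2)) (a, b)
      = (a + (l.countP (fun p => p.1 < p.2) : Int), b + (l.countP (fun p => p.1 > p.2) : Int)) := by
  intro l
  induction l with
  | nil => simp
  | cons p l ih =>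
    intro a b
    simp only [List.foldl_cons, List.countP_cons, ih]
    split_ifs <;> simp_all <;> omega

theorem foldl_range_zip_aux {α : Type} (g : α → Int → Int → α) :
    ∀ (s t : List Int), s.length = t.length → ∀ (init : α),
      (List.range s.length).foldl (fun ab k => g ab (s.getD k 0) (t.getD k 0)) init
      = (s.zip t).foldl (fun ab p => g ab p.1 p.2) init := by
  intro s
  induction s with
  | nil => intro t h init; simp
  | cons a s ih =>
    intro t h init
    cases t with
    | nil => simp at h
    | cons b t =>
      simp only [List.length_cons, List.range_succ_eq_map, List.foldl_cons, List.foldl_map,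
        List.zip_cons_cons, List.getD_cons_zero, List.getD_cons_succ]
      exact ih t (by simpa using h) (g init a b)

theorem foldl_range_zip {α : Type} (g : α → Int → Int → α)
    (s t : List Int) (h : s.length = t.length) (init : α) :
      (PySem.List.pyRange 0 (s.length : Int) 1).foldl
        (fun ab x => g ab (PySem.List.pyGetD s x 0) (PySem.List.pyGetD t x 0)) init
      = (s.zip t).foldl (fun ab p => g ab p.1 p.2) init := by
  rw [PySem.List.pyRange_one]
  simp only [List.foldl_map, sub_zero, Int.toNat_natCast, zero_add, PySem.List.pyGetD_natCast]
  exact foldl_range_zip_aux g s t h init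

theorem pvCheck_eq (v : Int) :
    ∀ (l : List (Int × Int)),
      pvCheck v l = if ∀ p ∈ l, pvSign p.1 p.2 = v then v else 0 := by
  intro l
  induction l with
  | nil => simp [pvCheck]
  | cons p rest ih =>
    by_cases h : pvSign p.1 p.2 = v
    · have hiff : (∀ q ∈ rest, pvSign q.1 q.2 = v) ↔ (∀ q ∈ p :: rest, pvSign q.1 q.2 = v) := by
        simp [List.forall_mem_cons, h]
      rw [pvCheck, if_neg (not_not_intro h), ih, if_congr hiff rfl rfl]
    · rw [pvCheck, if_pos h, if_neg]
      intro hall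
      exact h (hall p (List.mem_cons_self ..))

theorem primerjaj_eq_alt (s t : List Int) (hne : ¬ (s = [] ∧ t = [])) :
    primerjaj s t = primerjaj_alt s t := by
  unfold primerjaj primerjaj_alt
  by_cases hlen : s.length = t.length
  · rw [if_pos hlen]
    rw [foldl_range_zip (fun ab x y =>
      (if x < y then ab.1 + 1 else ab.1, if x > y then ab.2 + 1 else ab.2)) s t hlen (0,0)]
    rw [fold_counts]
    -- s is nonempty: if s = [] then t = [] by length
    cases s with
    | nil =>
      cases t with
      | nil => exact absurd ⟨rfl, rfl⟩ hne
      | cons b t => simp at hlen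
    | cons a s =>
      cases t with
      | nil => simp at hlen
      | cons b t =>
        rw [if_neg (show ¬((a :: s).length ≠ (b :: t).length ∨ a :: s = []) by simp [hlen])]
        simp only [List.zip_cons_cons, List.headD_cons, List.drop_one, List.tail_cons]
        set l := (a, b) :: s.zip t with hl
        have hlength : l.length = (a :: s).length := by
          have h' : s.length = t.length := by simpa using hlen
          simp [hl, List.length_zip, h']
        simp only [zero_add]
        have hcl : ((a :: s).length : Int) = (l.countP fun p => p.1 < p.2 : Nat) ↔
            ∀ p ∈ l, p.1 < p.2 := by
          rw [← hlength, Nat.cast_inj, eq_comm, List.countP_eq_length]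
          simp
        have hcg : ((a :: s).length : Int) = (l.countP fun p => p.1 > p.2 : Nat) ↔
            ∀ p ∈ l, p.1 > p.2 := by
          rw [← hlength, Nat.cast_inj, eq_comm, List.countP_eq_length]
          simp
        rw [pvCheck_eq]
        by_cases hP : ∀ p ∈ l, p.1 < p.2
        · have hab : a < b := hP (a, b) (by simp [hl])
          have hv : pvSign a b = -1 := by simp [pvSign, hab]
          rw [if_pos (hcl.2 hP), hv, if_neg (by decide), if_pos]
          intro p hp
          have := hP p (by simp [hl, hp])
          simp [pvSign, this]
        · rw [if_neg (fun h => hP (hcl.1 h))]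
          by_cases hQ : ∀ p ∈ l, p.1 > p.2
          · have hab : a > b := hQ (a, b) (by simp [hl])
            have hv : pvSign a b = 1 := by
              simp only [pvSign]
              rw [if_neg (by omega), if_pos hab]
            rw [if_pos (hcg.2 hQ), hv, if_neg (by decide), if_pos]
            intro p hp
            have := hQ p (by simp [hl, hp])
            simp only [pvSign]
            rw [if_neg (by omega), if_pos this]
          · rw [if_neg (fun h => hQ (hcg.1 h))]
            -- B must also give 0
            by_cases hv0 : pvSign a b = 0
            · rw [hv0, if_pos rfl]
            · rw [if_neg hv0]
              rcases lt_trichotomy a b with hab | hab | hab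
              · -- head <, but not all <: some rest pair is not <
                have hv : pvSign a b = -1 := by simp [pvSign, hab]
                rw [hv, if_neg]
                simp only [not_forall]
                push_neg at hP
                obtain ⟨p, hp, hnp⟩ := hP
                have hpr : p ∈ s.zip t := by
                  rcases (by simpa [hl] using hp) with h | h
                  · exfalso; rw [h] at hnp; simp at hnp; omega
                  · exact h
                refine ⟨p, hpr, ?_⟩
                simp only [pvSign]
                rw [if_neg (show ¬ p.1 < p.2 by omega)]
                split_ifs <;> decide
              · exact absurd (by simp [pvSign, hab]) hv0
              · have hv : pvSign a b = 1 := by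
                  simp only [pvSign]
                  rw [if_neg (by omega), if_pos hab]
                rw [hv, if_neg]
                simp only [not_forall]
                push_neg at hQ
                obtain ⟨p, hp, hnp⟩ := hQ
                have hpr : p ∈ s.zip t := by
                  rcases (by simpa [hl] using hp) with h | h
                  · exfalso; rw [h] at hnp; simp at hnp; omega
                  · exact h
                refine ⟨p, hpr, ?_⟩
                simp only [pvSign]
                split_ifs with h1 h2
                · decide
                · omega
                · decide
  · rw [if_neg hlen, if_pos (Or.inl hlen)]

-- ===== VERDICT (by name: the statement is the Claim_ definition above) =====
theorem primerjaj_spec : Claim_unchanged_primerjaj := by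
  intro s t _ hd
  exact primerjaj_eq_alt s t hd

theorem primerjaj_changed : Claim_changed_primerjaj := by
  unfold Claim_changed_primerjaj; decide

theorem primerjaj_tight : Claim_exact_primerjaj := by
  intro s t _ hd
  obtain ⟨hs, ht⟩ := hd
  subst hs; subst ht
  decide
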